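-- pv_equiv track=rewrite | github.com/0921sean/Programmers | Programmers_KIT/DFS_BFS/fill_puzzle.py | find_pieces
-- ===== SOURCE A (Python) =====
-- from collections import deque
--
-- def find_pieces(board, target):
--     n = len(board)
--     visited = [[False] * n for _ in range(n)]
--     pieces = []
--
--     for i in range(n):
--         for j in range(n):
--             if board[i][j] == target and not visited[i][j]:
--                 # BFS로 연결된 조각 찾기
--                 piece = []
--                 queue = deque([(i, j)])
--                 visited[i][j] = True
--
--                 while queue:
--                     x, y = queue.popleft()
--                     piece.append((x, y))
--
--                     for dx, dy in [(-1, 0), (1, 0), (0, 1), (0, -1)]: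
--                         nx, ny = x + dx, y + dy
--                         if 0 <= nx < n and 0 <= ny < n and board[nx][ny] == target \
--                         and not visited[nx][ny]:
--                             queue.append((nx, ny))
--                             visited[nx][ny] = True
--
--                 normalized_piece = normalize(piece)
--                 pieces.append(normalized_piece)
--
--     return pieces
--
-- def normalize(coords):
--     min_x = min(x for x, y in coords)
--     min_y = min(y for x, y in coords)
--     return sorted([(x - min_x, y - min_y) for x, y in coords])
-- ===== SOURCE B (Python) =====
-- # Fixed-point frontier saturation over coordinate sets instead of a queue BFS with a
-- # visited matrix: each piece is the closure of its first cell under target-neighbour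
-- # expansion; cells are sorted before shifting (shift preserves order), so no final sort.
-- DIRS = ((-1, 0), (1, 0), (0, 1), (0, -1))
--
--
-- def _component(board, target, i, j):
--     n = len(board)
--     comp = {(i, j)}
--     frontier = {(i, j)}
--     for _ in range(n * n):  # the closure is reached within n*n rounds
--         if not frontier:
--             break
--         nxt = {(x + dx, y + dy)
--                for (x, y) in frontier for (dx, dy) in DIRS
--                if 0 <= x + dx < n and 0 <= y + dy < n
--                and board[x + dx][y + dy] == target} - comp
--         comp |= nxt
--         frontier = nxt
--     return comp
--
--
-- def find_pieces(board, target):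
--     n = len(board)
--     pieces = []
--     assigned = set()
--     for i in range(n):
--         for j in range(n):
--             if board[i][j] == target and (i, j) not in assigned:
--                 comp = _component(board, target, i, j)
--                 assigned |= comp
--                 mi = min(x for x, y in comp)
--                 mj = min(y for x, y in comp)
--                 pieces.append([(x - mi, y - mj) for x, y in sorted(comp)])
--     return pieces
-- ===== Notes on version B (the rewrite author's own statement) =====
-- stated objective: alternative
-- what changed: Replaces the queue-BFS with a mutable n*n visited matrix by a pure fixed-point saturation: each piece is the closure of its first cell under target-neighbour set expansion (set comprehensions and set difference, no queue, no matrix), discovered cells tracked in one 'assigned' set, and each piece is sorted before shifting instead of sorted after.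
import Mathlib
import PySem

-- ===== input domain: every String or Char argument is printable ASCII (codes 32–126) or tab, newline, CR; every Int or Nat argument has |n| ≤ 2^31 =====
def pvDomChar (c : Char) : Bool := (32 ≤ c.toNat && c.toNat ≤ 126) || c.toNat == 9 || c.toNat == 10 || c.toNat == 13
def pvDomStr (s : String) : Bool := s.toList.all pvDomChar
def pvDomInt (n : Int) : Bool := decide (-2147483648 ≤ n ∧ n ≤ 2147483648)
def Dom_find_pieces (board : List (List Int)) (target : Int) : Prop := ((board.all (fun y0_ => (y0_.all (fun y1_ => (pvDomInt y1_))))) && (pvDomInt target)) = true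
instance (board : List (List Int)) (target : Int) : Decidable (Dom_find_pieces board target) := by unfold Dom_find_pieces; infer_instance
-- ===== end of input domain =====

-- B replaces A's queue BFS over a mutable visited matrix by a pure fixed-point
-- saturation of coordinate sets (frontier expansion to a closure), tracking
-- discovered cells in one set and sorting each piece before shifting.

-- ===== PORT A =====
def pvDirs : List (Int × Int) := [(-1, 0), (1, 0), (0, 1), (0, -1)]

def pvBGet (board : List (List Int)) (x y : Int) : Option Int :=
  (PySem.List.pyGet? board x).bind (fun row => PySem.List.pyGet? row y)

def pvVGet (vis : List (List Bool)) (x y : Int) : Bool :=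
  PySem.List.pyGetD (PySem.List.pyGetD vis x []) y true

def pvVSet (vis : List (List Bool)) (x y : Int) : List (List Bool) :=
  vis.modify x.toNat (fun row => row.set y.toNat true)

def pvFalseCount (vis : List (List Bool)) : Nat :=
  (vis.map (fun r => r.countP (fun b => !b))).sum

def pvEnqStep (board : List (List Int)) (target : Int) (n : Int) (x y : Int)
    (st : List (Int × Int) × List (List Bool)) (d : Int × Int) :
    List (Int × Int) × List (List Bool) :=
  let nx := x + d.1
  let ny := y + d.2
  if 0 ≤ nx ∧ nx < n ∧ 0 ≤ ny ∧ ny < n ∧ pvBGet board nx ny = some target ∧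
      pvVGet st.2 nx ny = false then
    (st.1 ++ [(nx, ny)], pvVSet st.2 nx ny)
  else st

def pvBfs (board : List (List Int)) (target : Int) (n : Int) :
    List (Int × Int) → List (List Bool) → List (Int × Int) →
    List (Int × Int) × List (List Bool)
  | [], vis, piece => (piece, vis)
  | (x, y) :: rest, vis, piece =>
    let st := pvDirs.foldl (pvEnqStep board target n x y) (rest, vis)
    if h : 5 * pvFalseCount st.2 + st.1.length <
        5 * pvFalseCount vis + ((x, y) :: rest).length then
      pvBfs board target n st.1 st.2 (piece ++ [(x, y)])
    else (piece ++ [(x, y)], st.2)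
termination_by q vis _ => 5 * pvFalseCount vis + q.length
decreasing_by exact h

def pvNormalize (coords : List (Int × Int)) : List (Int × Int) :=
  let min_x := match PySem.List.min? (coords.map (fun c => c.1)) (fun v => v) with
    | some m => m | none => 0
  let min_y := match PySem.List.min? (coords.map (fun c => c.2)) (fun v => v) with
    | some m => m | none => 0
  PySem.List.sorted2 (coords.map (fun c => (c.1 - min_x, c.2 - min_y)))
    (fun c => c.1) (fun c => c.2)

def pvCellA (board : List (List Int)) (target : Int) (n : Int)
    (st : List (List Bool) × List (List (Int × Int))) (i j : Int) :
    List (List Bool) × List (List (Int × Int)) :=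
  if pvBGet board i j = some target ∧ pvVGet st.1 i j = false then
    let vis1 := pvVSet st.1 i j
    let r := pvBfs board target n [(i, j)] vis1 []
    (r.2, st.2 ++ [pvNormalize r.1])
  else st

def find_pieces (board : List (List Int)) (target : Int) : List (List (Int × Int)) :=
  let n : Int := board.length
  let visited0 : List (List Bool) :=
    List.replicate n.toNat (List.replicate n.toNat false)
  ((PySem.List.pyRange 0 n 1).foldl (fun st i =>
    (PySem.List.pyRange 0 n 1).foldl (fun st j => pvCellA board target n st i j) st)
    (visited0, [])).2

-- ===== PORT B =====
def pvNbrs (board : List (List Int)) (target : Int) (n : Int) (c : Int × Int) :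
    List (Int × Int) :=
  pvDirs.filterMap (fun d =>
    let nx := c.1 + d.1
    let ny := c.2 + d.2
    if 0 ≤ nx ∧ nx < n ∧ 0 ≤ ny ∧ ny < n ∧ pvBGet board nx ny = some target then
      some (nx, ny)
    else none)

def pvCompLoop (board : List (List Int)) (target : Int) (n : Int) :
    Nat → PySem.Set (Int × Int) → PySem.Set (Int × Int) → PySem.Set (Int × Int)
  | 0, comp, _ => comp
  | fuel + 1, comp, frontier =>
    if frontier.isEmpty then comp
    else
      let nxt := PySem.Set.diff
        (PySem.Set.ofList (frontier.flatMap (pvNbrs board target n))) comp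
      pvCompLoop board target n fuel (PySem.Set.update comp nxt) nxt

def pvComponent (board : List (List Int)) (target : Int) (i j : Int) :
    PySem.Set (Int × Int) :=
  let n : Int := board.length
  pvCompLoop board target n (n.toNat * n.toNat) [(i, j)] [(i, j)]

def pvCellB (board : List (List Int)) (target : Int)
    (st : PySem.Set (Int × Int) × List (List (Int × Int))) (i j : Int) :
    PySem.Set (Int × Int) × List (List (Int × Int)) :=
  if pvBGet board i j = some target ∧ PySem.Set.contains st.1 (i, j) = false then
    let comp := pvComponent board target i j
    let mi := match PySem.List.min? (comp.map (fun c => c.1)) (fun v => v) with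
      | some m => m | none => 0
    let mj := match PySem.List.min? (comp.map (fun c => c.2)) (fun v => v) with
      | some m => m | none => 0
    (PySem.Set.update st.1 comp,
     st.2 ++ [(PySem.List.sorted2 comp (fun c => c.1) (fun c => c.2)).map
       (fun c => (c.1 - mi, c.2 - mj))])
  else st

def find_pieces_alt (board : List (List Int)) (target : Int) :
    List (List (Int × Int)) :=
  let n : Int := board.length
  ((PySem.List.pyRange 0 n 1).foldl (fun st i =>
    (PySem.List.pyRange 0 n 1).foldl (fun st j => pvCellB board target st i j) st)
    (([] : PySem.Set (Int × Int)), [])).2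

-- ===== PRECONDITION & SPEC =====
-- Pre_ excludes exactly the ragged boards having a row shorter than len(board),
-- on which A (and B alike) raises IndexError at board[i][j].
def Pre_find_pieces (board : List (List Int)) (target : Int) : Prop :=
  ∀ row ∈ board, board.length ≤ row.length
instance (board : List (List Int)) (target : Int) :
    Decidable (Pre_find_pieces board target) := by
  unfold Pre_find_pieces; infer_instance

def pvWitness_find_pieces : List (List Int) × Int := ([[1, 0], [1, 1]], 1)

def Spec_find_pieces (board : List (List Int)) (target : Int)
    (out : List (List (Int × Int))) : Prop := out = find_pieces_alt board target
instance (board : List (List Int)) (target : Int) (out : List (List (Int × Int))) :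
    Decidable (Spec_find_pieces board target out) := by
  unfold Spec_find_pieces; infer_instance

-- ===== CLAIM (what is proved, stated in full; the proofs are below) =====
def Claim_equal_find_pieces : Prop := ∀ (board : List (List Int)) (target : Int), Dom_find_pieces board target → Pre_find_pieces board target → Spec_find_pieces board target (find_pieces board target)

-- ===== LEMMAS AND PROOFS =====
-- abstract geometry shared by the proofs about both ports (proof-only definitions)
def pvInR (n : Int) (c : Int × Int) : Prop :=
  0 ≤ c.1 ∧ c.1 < n ∧ 0 ≤ c.2 ∧ c.2 < n

def pvTgt (board : List (List Int)) (target : Int) (c : Int × Int) : Prop :=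
  pvInR (board.length : Int) c ∧ pvBGet board c.1 c.2 = some target

def pvStp (board : List (List Int)) (target : Int) (c d : Int × Int) : Prop :=
  (∃ dir ∈ pvDirs, d = (c.1 + dir.1, c.2 + dir.2)) ∧ pvTgt board target d

def pvReach (board : List (List Int)) (target : Int) (s c : Int × Int) : Prop :=
  Relation.ReflTransGen (pvStp board target) s c

def pvShape (n : Int) (vis : List (List Bool)) : Prop :=
  vis.length = n.toNat ∧ ∀ r ∈ vis, r.length = n.toNat

def pvGrid (n : Int) : List (Int × Int) :=
  (PySem.List.pyRange 0 n 1).flatMap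
    (fun i => (PySem.List.pyRange 0 n 1).map (fun j => (i, j)))

def pvScanInv (board : List (List Int)) (target : Int)
    (stA : List (List Bool) × List (List (Int × Int)))
    (stB : PySem.Set (Int × Int) × List (List (Int × Int))) : Prop :=
  pvShape (board.length : Int) stA.1 ∧
  stA.2 = stB.2 ∧
  stB.1.Nodup ∧
  (∀ c, pvInR (board.length : Int) c → (pvVGet stA.1 c.1 c.2 = true ↔ c ∈ stB.1)) ∧
  (∀ c ∈ stB.1, pvTgt board target c) ∧
  (∀ c ∈ stB.1, ∀ d, pvStp board target c d → d ∈ stB.1)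

lemma mem_pvNbrs (board : List (List Int)) (target : Int) (c d : Int × Int) :
    d ∈ pvNbrs board target (board.length : Int) c ↔ pvStp board target c d := by
  simp only [pvNbrs, List.mem_filterMap]
  constructor
  · rintro ⟨dir, hdir, hf⟩
    split at hf
    · next hcond =>
      cases hf
      exact ⟨⟨dir, hdir, rfl⟩,
        ⟨⟨hcond.1, hcond.2.1, hcond.2.2.1, hcond.2.2.2.1⟩, hcond.2.2.2.2⟩⟩
    · cases hf
  · rintro ⟨⟨dir, hdir, rfl⟩, hin, hb⟩
    exact ⟨dir, hdir, by
      rw [if_pos ⟨hin.1, hin.2.1, hin.2.2.1, hin.2.2.2, hb⟩]⟩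

lemma pvStp_symm (board : List (List Int)) (target : Int) {c d : Int × Int}
    (hc : pvTgt board target c) (h : pvStp board target c d) :
    pvStp board target d c := by
  obtain ⟨⟨dir, hdir, hd⟩, _⟩ := h
  refine ⟨⟨(-dir.1, -dir.2), ?_, ?_⟩, hc⟩
  · simp only [pvDirs, List.mem_cons, List.not_mem_nil, or_false] at hdir ⊢
    rcases hdir with rfl | rfl | rfl | rfl <;> simp
  · cases hd; obtain ⟨c1, c2⟩ := c; simp

lemma pvReach_tgt (board : List (List Int)) (target : Int) {s c : Int × Int}
    (hs : pvTgt board target s) (h : pvReach board target s c) :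
    pvTgt board target c := by
  induction h with
  | refl => exact hs
  | tail _ h2 _ => exact h2.2

lemma pvReach_rev (board : List (List Int)) (target : Int) {s c : Int × Int}
    (hs : pvTgt board target s) (h : pvReach board target s c) :
    pvReach board target c s := by
  induction h with
  | refl => exact Relation.ReflTransGen.refl
  | tail h1 h2 ih =>
    exact Relation.ReflTransGen.head
      (pvStp_symm board target (pvReach_tgt board target hs h1) h2) ih

lemma pvClosed_reach (board : List (List Int)) (target : Int)
    (V : Int × Int → Prop) (hV : ∀ a, V a → ∀ d, pvStp board target a d → V d)
    {c s : Int × Int} (hc : V c) (h : pvReach board target c s) : V s := by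
  induction h with
  | refl => exact hc
  | tail _ h2 ih => exact hV _ ih _ h2

lemma pvReach_not_V (board : List (List Int)) (target : Int)
    (V : Int × Int → Prop) (hV : ∀ a, V a → ∀ d, pvStp board target a d → V d)
    {s c : Int × Int} (hs : pvTgt board target s) (hsV : ¬ V s)
    (h : pvReach board target s c) : ¬ V c := fun hc =>
  hsV (pvClosed_reach board target V hV hc (pvReach_rev board target hs h))

lemma pvReach_subset (board : List (List Int)) (target : Int)
    (V : Int × Int → Prop) (hV : ∀ a, V a → ∀ d, pvStp board target a d → V d)
    {s : Int × Int} (P : List (Int × Int)) (hs : pvTgt board target s)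
    (hsP : s ∈ P) (hPV : ∀ c ∈ P, ¬ V c)
    (hcl : ∀ c ∈ P, ∀ d, pvStp board target c d → V d ∨ d ∈ P) :
    ∀ c, pvReach board target s c → c ∈ P := by
  intro c hr
  induction hr with
  | refl => exact hsP
  | @tail b c h1 h2 ih =>
    rcases hcl _ ih _ h2 with hv | hp
    · exact absurd hv
        (pvReach_not_V board target V hV hs (hPV s hsP) (h1.tail h2))
    · exact hp

lemma mem_pvGrid (n : Int) (c : Int × Int) : c ∈ pvGrid n ↔ pvInR n c := by
  obtain ⟨a, b⟩ := c
  simp only [pvGrid, List.mem_flatMap, List.mem_map, PySem.List.mem_pyRange_one,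
    pvInR, Prod.mk.injEq]
  constructor
  · rintro ⟨i, ⟨hi0, hi1⟩, j, ⟨hj0, hj1⟩, rfl, rfl⟩
    exact ⟨hi0, hi1, hj0, hj1⟩
  · rintro ⟨h1, h2, h3, h4⟩
    exact ⟨a, ⟨h1, h2⟩, b, ⟨h3, h4⟩, rfl, rfl⟩

lemma nodup_length_le {α : Type} [DecidableEq α] {l l' : List α}
    (h : l.Nodup) (hs : l ⊆ l') : l.length ≤ l'.length :=
  calc l.length = l.toFinset.card := (List.toFinset_card_of_nodup h).symm
    _ ≤ l'.toFinset.card :=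
        Finset.card_le_card (fun x hx => List.mem_toFinset.2 (hs (List.mem_toFinset.1 hx)))
    _ ≤ l'.length := l'.toFinset_card_le

lemma length_pvGrid (n : Int) : (pvGrid n).length = n.toNat * n.toNat := by
  simp only [pvGrid, List.length_flatMap, List.length_map]
  rw [List.map_const', List.sum_replicate, PySem.List.length_pyRange_one, smul_eq_mul,
    Int.sub_zero]

lemma pvShape_vset {n : Int} {vis : List (List Bool)} (hsh : pvShape n vis)
    (x y : Int) : pvShape n (pvVSet vis x y) := by
  obtain ⟨h1, h2⟩ := hsh
  constructor
  · simpa [pvVSet] using h1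
  · intro r hr
    simp only [pvVSet] at hr
    by_cases hx : x.toNat < vis.length
    · rw [List.modify_eq_set_get _ hx] at hr
      rcases List.mem_or_eq_of_mem_set hr with hm | rfl
      · exact h2 _ hm
      · simpa using h2 _ (List.getElem_mem hx)
    · rw [List.modify_eq_self (by omega)] at hr
      exact h2 _ hr

lemma pvVGet_eq {n : Int} {vis : List (List Bool)} (hsh : pvShape n vis)
    {a b : Int} (hin : pvInR n (a, b)) :
    pvVGet vis a b = (vis.getD a.toNat []).getD b.toNat true := by
  obtain ⟨h1, h2, h3, h4⟩ := hin
  rw [pvVGet, PySem.List.pyGetD_of_nonneg _ _ h1, PySem.List.pyGetD_of_nonneg _ _ h3]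

lemma pvVGet_getElem {n : Int} {vis : List (List Bool)} (hsh : pvShape n vis)
    {a b : Int} (hin : pvInR n (a, b)) (ha : a.toNat < vis.length)
    (hb : b.toNat < (vis[a.toNat]).length) :
    pvVGet vis a b = (vis[a.toNat])[b.toNat] := by
  rw [pvVGet_eq hsh hin, List.getD_eq_getElem _ _ ha, List.getD_eq_getElem _ _ hb]

lemma pvBounds {n : Int} {vis : List (List Bool)} (hsh : pvShape n vis)
    {a b : Int} (hin : pvInR n (a, b)) :
    a.toNat < vis.length ∧ ∀ (h : a.toNat < vis.length), b.toNat < (vis[a.toNat]).length := by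
  obtain ⟨h1, h2⟩ := hsh
  obtain ⟨q1, q2, q3, q4⟩ := hin
  have : a.toNat < n.toNat := by omega
  refine ⟨by omega, fun h => ?_⟩
  rw [h2 _ (List.getElem_mem h)]
  omega

lemma pvVGet_vset_self {n : Int} {vis : List (List Bool)} (hsh : pvShape n vis)
    {x y : Int} (hin : pvInR n (x, y)) :
    pvVGet (pvVSet vis x y) x y = true := by
  have ha : x.toNat < vis.length := (pvBounds hsh hin).1
  have hb : y.toNat < (vis[x.toNat]).length := (pvBounds hsh hin).2 ha
  rw [pvVGet_eq (pvShape_vset hsh x y) hin]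
  simp [pvVSet, List.getD_eq_getElem?_getD, List.getElem?_modify,
    List.getElem?_eq_getElem ha, List.getElem?_set_self (by simpa using hb)]

lemma pvVGet_vset_other {n : Int} {vis : List (List Bool)} (hsh : pvShape n vis)
    {x y a b : Int} (hxy : pvInR n (x, y)) (hab : pvInR n (a, b))
    (hne : (a, b) ≠ (x, y)) :
    pvVGet (pvVSet vis x y) a b = pvVGet vis a b := by
  have hxa : x.toNat < vis.length := (pvBounds hsh hxy).1
  have haa : a.toNat < vis.length := (pvBounds hsh hab).1
  rw [pvVGet_eq (pvShape_vset hsh x y) hab, pvVGet_eq hsh hab]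
  by_cases hax : a = x
  · subst hax
    have hby : b.toNat ≠ y.toNat := by
      obtain ⟨_, _, hb0, _⟩ := hab
      obtain ⟨_, _, hy0, _⟩ := hxy
      exact fun h => hne (by rw [show b = y by omega])
    simp [pvVSet, List.getD_eq_getElem?_getD, List.getElem?_modify,
      List.getElem?_eq_getElem haa, List.getElem?_set, Ne.symm hby]
  · have haxn : x.toNat ≠ a.toNat := by
      obtain ⟨ha0, _, _, _⟩ := hab
      obtain ⟨hx0, _, _, _⟩ := hxy
      exact fun h => hax (by omega)
    simp [pvVSet, List.getD_eq_getElem?_getD, List.getElem?_modify, haxn]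

lemma sum_set_lt (l : List Nat) (i : Nat) (a : Nat) (hi : i < l.length)
    (ha : a < l[i]) : (l.set i a).sum < l.sum := by
  induction l generalizing i with
  | nil => simp at hi
  | cons x t ih =>
    cases i with
    | zero => simp at ha ⊢; omega
    | succ k =>
      simp only [List.set_cons_succ, List.sum_cons]
      have := ih k (by simpa using hi) (by simpa using ha)
      omega

lemma countP_set_true_lt (r : List Bool) (k : Nat) (hk : k < r.length)
    (hv : r[k] = false) :
    (r.set k true).countP (fun b => !b) < r.countP (fun b => !b) := by
  induction r generalizing k with
  | nil => simp at hk
  | cons x t ih =>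
    cases k with
    | zero =>
      simp only [List.getElem_cons_zero] at hv
      subst hv
      simp [List.countP_cons]
    | succ m =>
      simp only [List.set_cons_succ, List.countP_cons]
      have := ih m (by simpa using hk) (by simpa using hv)
      omega

lemma pvFalseCount_vset {n : Int} {vis : List (List Bool)} (hsh : pvShape n vis)
    {x y : Int} (hin : pvInR n (x, y)) (hf : pvVGet vis x y = false) :
    pvFalseCount (pvVSet vis x y) < pvFalseCount vis := by
  obtain ⟨ha, hb⟩ := pvBounds hsh hin
  rw [pvVGet_getElem hsh hin ha (hb ha)] at hf
  simp only [pvFalseCount, pvVSet, List.modify_eq_set_get _ ha, List.map_set]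
  refine sum_set_lt _ _ _ (by simpa using ha) ?_
  rw [List.getElem_map]
  exact countP_set_true_lt _ _ (hb ha) hf

lemma pvShape_init (n : Int) :
    pvShape n (List.replicate n.toNat (List.replicate n.toNat false)) := by
  constructor
  · simp
  · intro r hr
    rw [List.eq_of_mem_replicate hr]
    simp

lemma pvVGet_init (n : Int) {a b : Int} (hin : pvInR n (a, b)) :
    pvVGet (List.replicate n.toNat (List.replicate n.toNat false)) a b = false := by
  obtain ⟨ha, hb⟩ := pvBounds (pvShape_init n) hin
  rw [pvVGet_getElem (pvShape_init n) hin ha (hb ha)]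
  simp

lemma pvEnq_fold (board : List (List Int)) (target : Int)
    (V0 : Int × Int → Prop) (s : Int × Int) (x y : Int)
    (piece1 : List (Int × Int))
    (hxyR : pvReach board target s (x, y)) :
    ∀ (ds : List (Int × Int)) (q : List (Int × Int)) (vis : List (List Bool)),
    (∀ d ∈ ds, d ∈ pvDirs) →
    pvShape (board.length : Int) vis →
    (∀ c, pvInR (board.length : Int) c →
      (pvVGet vis c.1 c.2 = true ↔ V0 c ∨ c ∈ piece1 ++ q)) →
    (∀ c ∈ piece1 ++ q, pvReach board target s c) →
    (piece1 ++ q).Nodup →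
    (∀ c ∈ piece1 ++ q, ¬ V0 c) →
    (let r := ds.foldl (pvEnqStep board target (board.length : Int) x y) (q, vis);
    pvShape (board.length : Int) r.2 ∧
    (∀ c, pvInR (board.length : Int) c →
      (pvVGet r.2 c.1 c.2 = true ↔ V0 c ∨ c ∈ piece1 ++ r.1)) ∧
    (∀ c ∈ piece1 ++ r.1, pvReach board target s c) ∧
    (piece1 ++ r.1).Nodup ∧
    (∀ c ∈ piece1 ++ r.1, ¬ V0 c) ∧
    (∀ d ∈ ds, pvStp board target (x, y) (x + d.1, y + d.2) →
      V0 (x + d.1, y + d.2) ∨ (x + d.1, y + d.2) ∈ piece1 ++ r.1) ∧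
    (∃ k : Nat, r.1.length = q.length + k ∧ pvFalseCount r.2 + k ≤ pvFalseCount vis) ∧
    (∀ c ∈ q, c ∈ r.1)) := by
  intro ds
  induction ds with
  | nil =>
    intro q vis _ H0 H1 H2 H3 H4
    exact ⟨H0, H1, H2, H3, H4, by simp, ⟨0, by simp⟩, fun c hc => hc⟩
  | cons d ds ih =>
    intro q vis hds H0 H1 H2 H3 H4
    simp only [List.foldl_cons]
    by_cases hc : 0 ≤ x + d.1 ∧ x + d.1 < (board.length : Int) ∧ 0 ≤ y + d.2 ∧
        y + d.2 < (board.length : Int) ∧ pvBGet board (x + d.1) (y + d.2) = some target ∧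
        pvVGet vis (x + d.1) (y + d.2) = false
    · -- the neighbour is enqueued and marked
      have hstep : pvEnqStep board target (board.length : Int) x y (q, vis) d =
          (q ++ [(x + d.1, y + d.2)], pvVSet vis (x + d.1) (y + d.2)) := by
        simp only [pvEnqStep, if_pos hc]
      rw [hstep]
      have hnbIn : pvInR (board.length : Int) (x + d.1, y + d.2) :=
        ⟨hc.1, hc.2.1, hc.2.2.1, hc.2.2.2.1⟩
      have hnbT : pvTgt board target (x + d.1, y + d.2) := ⟨hnbIn, hc.2.2.2.2.1⟩
      have hnbS : pvStp board target (x, y) (x + d.1, y + d.2) := ⟨⟨d, hds d (by simp), rfl⟩, hnbT⟩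
      have hnbR : pvReach board target s (x + d.1, y + d.2) := hxyR.tail hnbS
      have hnbNew : (x + d.1, y + d.2) ∉ piece1 ++ q := fun hmem => by
        have := (H1 (x + d.1, y + d.2) hnbIn).2 (Or.inr hmem)
        rw [hc.2.2.2.2.2] at this
        exact Bool.false_ne_true this
      have hnbV0 : ¬ V0 (x + d.1, y + d.2) := fun hv => by
        have := (H1 (x + d.1, y + d.2) hnbIn).2 (Or.inl hv)
        rw [hc.2.2.2.2.2] at this
        exact Bool.false_ne_true this
      have H0' : pvShape (board.length : Int) (pvVSet vis (x + d.1, y + d.2).1 (x + d.1, y + d.2).2) :=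
        pvShape_vset H0 _ _
      have H1' : ∀ c, pvInR (board.length : Int) c →
          (pvVGet (pvVSet vis (x + d.1, y + d.2).1 (x + d.1, y + d.2).2) c.1 c.2 = true ↔
            V0 c ∨ c ∈ piece1 ++ (q ++ [(x + d.1, y + d.2)])) := by
        intro c hcin
        by_cases hce : c = (x + d.1, y + d.2)
        · subst hce
          constructor
          · intro _; right; simp
          · intro _
            exact pvVGet_vset_self H0 hcin
        · rw [show pvVGet (pvVSet vis (x + d.1, y + d.2).1 (x + d.1, y + d.2).2) c.1 c.2 = pvVGet vis c.1 c.2 from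
            pvVGet_vset_other H0 hnbIn hcin (by simpa using hce)]
          rw [H1 c hcin]
          constructor
          · rintro (h | h)
            · exact Or.inl h
            · right
              rcases List.mem_append.1 h with h | h
              · exact List.mem_append.2 (Or.inl h)
              · exact List.mem_append.2 (Or.inr (List.mem_append.2 (Or.inl h)))
          · rintro (h | h)
            · exact Or.inl h
            · right
              rcases List.mem_append.1 h with h | h
              · exact List.mem_append.2 (Or.inl h)
              · rcases List.mem_append.1 h with h | h
                · exact List.mem_append.2 (Or.inr h)
                · exact absurd (by simpa using h) hce
      have H2' : ∀ c ∈ piece1 ++ (q ++ [(x + d.1, y + d.2)]), pvReach board target s c := by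
        intro c hcm
        rcases List.mem_append.1 hcm with h | h
        · exact H2 c (List.mem_append.2 (Or.inl h))
        · rcases List.mem_append.1 h with h | h
          · exact H2 c (List.mem_append.2 (Or.inr h))
          · have hce : c = (x + d.1, y + d.2) := by simpa using h
            subst hce; exact hnbR
      have H3'' : (piece1 ++ (q ++ [(x + d.1, y + d.2)])).Nodup := by
        rw [← List.append_assoc, List.nodup_append]
        refine ⟨H3, List.nodup_singleton _, fun a ha b hb => ?_⟩
        have hbe : b = (x + d.1, y + d.2) := by simpa using hb
        subst hbe
        exact fun he => hnbNew (he ▸ ha)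
      have H4' : ∀ c ∈ piece1 ++ (q ++ [(x + d.1, y + d.2)]), ¬ V0 c := by
        intro c hcm
        rcases List.mem_append.1 hcm with h | h
        · exact H4 c (List.mem_append.2 (Or.inl h))
        · rcases List.mem_append.1 h with h | h
          · exact H4 c (List.mem_append.2 (Or.inr h))
          · have hce : c = (x + d.1, y + d.2) := by simpa using h
            subst hce; exact hnbV0
      obtain ⟨R0, R1, R2, R3, R4, R5, ⟨k, hk1, hk2⟩, R6⟩ :=
        ih (q ++ [(x + d.1, y + d.2)]) (pvVSet vis (x + d.1) (y + d.2))
          (fun e he => hds e (by simp [he]))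
          H0' H1' H2' H3'' H4'
      refine ⟨R0, R1, R2, R3, R4, ?_, ?_, ?_⟩
      · intro e he hst
        rcases List.mem_cons.1 he with he0 | he'
        · subst he0
          right
          have hmem : ((x + e.1, y + e.2) : Int × Int) ∈ q ++ [(x + e.1, y + e.2)] := by simp
          exact List.mem_append.2 (Or.inr (R6 _ hmem))
        · exact R5 e he' hst
      · refine ⟨k + 1, ?_, ?_⟩
        · rw [hk1]; simp; omega
        · have hlt : pvFalseCount (pvVSet vis (x + d.1) (y + d.2)) < pvFalseCount vis :=
            pvFalseCount_vset H0 hnbIn hc.2.2.2.2.2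
          omega
      · intro c hcq
        exact R6 c (by simp [hcq])
    · have hstep : pvEnqStep board target (board.length : Int) x y (q, vis) d = (q, vis) := by
        simp only [pvEnqStep]
        rw [if_neg hc]
      rw [hstep]
      obtain ⟨R0, R1, R2, R3, R4, R5, Rk, R6⟩ :=
        ih q vis (fun e he => hds e (by simp [he])) H0 H1 H2 H3 H4
      refine ⟨R0, R1, R2, R3, R4, ?_, Rk, R6⟩
      intro e he hst
      rcases List.mem_cons.1 he with rfl | he'
      · -- the condition failed although the step relation holds: already visited
        have hIn : pvInR (board.length : Int) (x + e.1, y + e.2) := hst.2.1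
        have hB : pvBGet board (x + e.1) (y + e.2) = some target := hst.2.2
        have hvis : pvVGet vis (x + e.1) (y + e.2) = true := by
          rcases Bool.eq_false_or_eq_true (pvVGet vis (x + e.1) (y + e.2)) with ht | hf
          · exact ht
          · exact absurd ⟨hIn.1, hIn.2.1, hIn.2.2.1, hIn.2.2.2, hB, hf⟩ hc
        have := (H1 _ hIn).1 hvis
        rcases this with h | h
        · exact Or.inl h
        · right
          rcases List.mem_append.1 h with h | h
          · exact List.mem_append.2 (Or.inl h)
          · exact List.mem_append.2 (Or.inr (R6 _ h))
      · exact R5 e he' hst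

lemma pvBfs_spec (board : List (List Int)) (target : Int)
    (V0 : Int × Int → Prop) (s : Int × Int)
    (hV5 : ∀ a, V0 a → ∀ d, pvStp board target a d → V0 d)
    (hT : pvTgt board target s) :
    ∀ (queue : List (Int × Int)) (vis : List (List Bool)) (piece : List (Int × Int)),
    pvShape (board.length : Int) vis →
    (∀ c, pvInR (board.length : Int) c →
      (pvVGet vis c.1 c.2 = true ↔ V0 c ∨ c ∈ piece ++ queue)) →
    (∀ c ∈ piece ++ queue, pvReach board target s c) →
    (piece ++ queue).Nodup →
    (∀ c ∈ piece ++ queue, ¬ V0 c) →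
    (∀ c ∈ piece, ∀ e, pvStp board target c e → V0 e ∨ e ∈ piece ++ queue) →
    s ∈ piece ++ queue →
    (let r := pvBfs board target (board.length : Int) queue vis piece;
    pvShape (board.length : Int) r.2 ∧
    (∀ c, pvInR (board.length : Int) c →
      (pvVGet r.2 c.1 c.2 = true ↔ V0 c ∨ c ∈ r.1)) ∧
    r.1.Nodup ∧
    (∀ c, c ∈ r.1 ↔ pvReach board target s c) ∧
    (∀ c ∈ r.1, ¬ V0 c)) := by
  intro queue vis piece
  fun_induction pvBfs board target (board.length : Int) queue vis piece with
  | case1 vis piece =>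
    intro H0 H1 H2 H3 H4 H5 H6
    simp only [List.append_nil] at H1 H2 H3 H4 H5 H6
    refine ⟨H0, fun c hc => H1 c hc, H3, fun c => ⟨fun hc => H2 c hc, ?_⟩, H4⟩
    intro hr
    exact pvReach_subset board target V0 hV5 piece hT H6 H4 H5 c hr
  | case2 x y rest vis piece st hguard ih =>
    intro H0 H1 H2 H3 H4 H5 H6
    have hsplit : piece ++ (x, y) :: rest = (piece ++ [(x, y)]) ++ rest := by simp
    rw [hsplit] at H1 H2 H3 H4 H5 H6
    have hxyR : pvReach board target s (x, y) :=
      H2 (x, y) (by simp)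
    obtain ⟨R0, R1, R2, R3, R4, R5, ⟨k, hk1, hk2⟩, R6⟩ :=
      pvEnq_fold board target V0 s x y (piece ++ [(x, y)]) hxyR pvDirs rest vis
        (fun d hd => hd) H0 H1 H2 H3 H4
    refine ih R0 R1 R2 R3 R4 ?_ ?_
    · intro c hc e hst
      rcases List.mem_append.1 hc with hc | hc
      · rcases H5 c hc e hst with hv | hm
        · exact Or.inl hv
        · rcases List.mem_append.1 hm with hm | hm
          · exact Or.inr (List.mem_append.2 (Or.inl hm))
          · exact Or.inr (List.mem_append.2 (Or.inr (R6 _ hm)))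
      · have hcxy : c = (x, y) := by simpa using hc
        subst hcxy
        obtain ⟨⟨dir, hdir, hde⟩, htgt⟩ := hst
        rw [hde]
        exact R5 dir hdir ⟨⟨dir, hdir, rfl⟩, hde ▸ htgt⟩
    · rcases List.mem_append.1 H6 with h | h
      · exact List.mem_append.2 (Or.inl h)
      · exact List.mem_append.2 (Or.inr (R6 _ h))
  | case3 x y rest vis piece st hguard =>
    intro H0 H1 H2 H3 H4 H5 H6
    exfalso
    have hsplit : piece ++ (x, y) :: rest = (piece ++ [(x, y)]) ++ rest := by simp
    rw [hsplit] at H1 H2 H3 H4 H6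
    have hxyR : pvReach board target s (x, y) :=
      H2 (x, y) (by simp)
    obtain ⟨R0, R1, R2, R3, R4, R5, ⟨k, hk1, hk2⟩, R6⟩ :=
      pvEnq_fold board target V0 s x y (piece ++ [(x, y)]) hxyR pvDirs rest vis
        (fun d hd => hd) H0 H1 H2 H3 H4
    apply hguard
    have hst1 : st.1 = (List.foldl (pvEnqStep board target (↑board.length) x y)
        (rest, vis) pvDirs).1 := rfl
    have hst2 : st.2 = (List.foldl (pvEnqStep board target (↑board.length) x y)
        (rest, vis) pvDirs).2 := rfl
    rw [hst1, hst2, hk1]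
    simp only [List.length_cons]
    omega

lemma pvCompLoop_spec (board : List (List Int)) (target : Int) (s : Int × Int)
    (hT : pvTgt board target s) :
    ∀ (fuel : Nat) (comp frontier : List (Int × Int)),
    comp.Nodup →
    (∀ c ∈ frontier, c ∈ comp) →
    s ∈ comp →
    (∀ c ∈ comp, pvReach board target s c) →
    (∀ c ∈ comp, c ∉ frontier → ∀ d, pvStp board target c d → d ∈ comp) →
    (frontier ≠ [] → board.length * board.length + 1 ≤ comp.length + fuel) →
    (let r := pvCompLoop board target (board.length : Int) fuel comp frontier;
     r.Nodup ∧ s ∈ r ∧ (∀ c ∈ r, pvReach board target s c) ∧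
     (∀ c ∈ r, ∀ d, pvStp board target c d → d ∈ r)) := by
  intro fuel
  induction fuel with
  | zero =>
    intro comp frontier h1 h2 h3 h4 h5 h6
    by_cases hf : frontier = []
    · subst hf
      exact ⟨h1, h3, h4, fun c hc d hd => h5 c hc (by simp) d hd⟩
    · exfalso
      have hsub : comp ⊆ pvGrid (board.length : Int) := by
        intro c hc
        exact (mem_pvGrid _ _).2 (pvReach_tgt board target hT (h4 c hc)).1
      have hle : comp.length ≤ board.length * board.length := by
        have := nodup_length_le h1 hsub
        rwa [length_pvGrid, Int.toNat_natCast] at this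
      have := h6 hf
      omega
  | succ fuel ih =>
    intro comp frontier h1 h2 h3 h4 h5 h6
    simp only [pvCompLoop]
    by_cases hf : frontier.isEmpty
    · rw [if_pos hf]
      have hfe : frontier = [] := List.isEmpty_iff.1 hf
      subst hfe
      exact ⟨h1, h3, h4, fun c hc d hd => h5 c hc (by simp) d hd⟩
    · rw [if_neg hf]
      have hfe : frontier ≠ [] := fun h => hf (by simp [h])
      set cand := frontier.flatMap (pvNbrs board target (board.length : Int)) with hcand
      set nxt := PySem.Set.diff (PySem.Set.ofList cand) comp with hnxt
      have hmemnxt : ∀ d, d ∈ nxt ↔ d ∈ cand ∧ d ∉ comp := by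
        intro d
        rw [hnxt, PySem.Set.mem_diff, PySem.Set.mem_ofList]
      have hnodnxt : nxt.Nodup := PySem.Set.nodup_diff _ _ (PySem.Set.nodup_ofList _)
      have hupdate : PySem.Set.update comp nxt = comp ++ nxt := by
        rw [PySem.Set.update_eq_append_filter,
          PySem.Set.ofList_eq_self_of_nodup nxt hnodnxt]
        congr 1
        apply List.filter_eq_self.2
        intro a ha
        have : a ∉ comp := ((hmemnxt a).1 ha).2
        simp [PySem.Set.contains_eq_listContains]
        intro hmem
        exact absurd hmem this
      rw [hupdate]
      have hcandR : ∀ d ∈ cand, pvReach board target s d := by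
        intro d hd
        rw [hcand, List.mem_flatMap] at hd
        obtain ⟨f, hfm, hdn⟩ := hd
        have hst := (mem_pvNbrs board target f d).1 hdn
        exact (h4 f (h2 f hfm)).tail hst
      refine ih (comp ++ nxt) nxt ?_ ?_ ?_ ?_ ?_ ?_
      · rw [List.nodup_append]
        refine ⟨h1, hnodnxt, fun a ha b hb => ?_⟩
        intro he
        exact ((hmemnxt b).1 hb).2 (he ▸ ha)
      · intro c hc; exact List.mem_append.2 (Or.inr hc)
      · exact List.mem_append.2 (Or.inl h3)
      · intro c hc
        rcases List.mem_append.1 hc with hcm | hcm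
        · exact h4 c hcm
        · exact hcandR c ((hmemnxt c).1 hcm).1
      · intro c hc hcn d hd
        rcases List.mem_append.1 hc with hcm | hcm
        · by_cases hcf : c ∈ frontier
          · have hdn : d ∈ cand := by
              rw [hcand, List.mem_flatMap]
              exact ⟨c, hcf, (mem_pvNbrs board target c d).2 hd⟩
            by_cases hdc : d ∈ comp
            · exact List.mem_append.2 (Or.inl hdc)
            · exact List.mem_append.2 (Or.inr ((hmemnxt d).2 ⟨hdn, hdc⟩))
          · exact List.mem_append.2 (Or.inl (h5 c hcm hcf d hd))
        · exact absurd hcm hcn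
      · intro hne
        have h6' := h6 hfe
        have : 1 ≤ nxt.length := by
          rcases nxt with _ | ⟨a, t⟩
          · exact absurd rfl hne
          · simp
        rw [List.length_append]
        omega

lemma pvComponent_spec (board : List (List Int)) (target : Int) {i j : Int}
    (hT : pvTgt board target (i, j)) :
    (pvComponent board target i j).Nodup ∧
    (∀ c, c ∈ pvComponent board target i j ↔ pvReach board target (i, j) c) := by
  obtain ⟨r1, r2, r3, r4⟩ :=
    pvCompLoop_spec board target (i, j) hT
      (((board.length : Int)).toNat * ((board.length : Int)).toNat)
      [(i, j)] [(i, j)] (List.nodup_singleton _) (fun c hc => hc) (by simp)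
      (fun c hc => by
        have hce : c = (i, j) := by simpa using hc
        subst hce; exact Relation.ReflTransGen.refl)
      (fun c hc hcn => absurd hc hcn)
      (fun _ => by
        simp only [List.length_cons, List.length_nil, Int.toNat_natCast]
        omega)
  refine ⟨r1, fun c => ⟨fun hc => r3 c hc, fun hr => ?_⟩⟩
  exact pvReach_subset board target (fun _ => False) (fun a ha => ha.elim) _ hT r2
    (fun c _ h => h) (fun c hc d hd => Or.inr (r4 c hc d hd)) c hr

lemma pvLex_lt_iff (a b : Int × Int) :
    toLex a < toLex b ↔ a.1 < b.1 ∨ (a.1 = b.1 ∧ a.2 < b.2) := by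
  rw [Prod.Lex.lt_iff]
  simp

lemma pvSorted2_eq (xs : List (Int × Int)) :
    PySem.List.sorted2 xs (fun c => c.1) (fun c => c.2) =
    PySem.List.sorted xs (fun c => toLex c) := by
  rw [PySem.List.sorted_eq_foldl_insertBy]
  show List.foldl (fun acc x => PySem.List.insertBy
    (fun a b => decide (a.1 < b.1) || (!decide (b.1 < a.1) && decide (a.2 < b.2))) x acc) [] xs = _
  have hbe : (fun (a b : Int × Int) =>
      decide (a.1 < b.1) || (!decide (b.1 < a.1) && decide (a.2 < b.2))) =
      (fun (a b : Int × Int) => decide (toLex a < toLex b)) := by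
    funext a b
    have hiff : (toLex a < toLex b) ↔ (a.1 < b.1 ∨ (¬ b.1 < a.1 ∧ a.2 < b.2)) := by
      rw [pvLex_lt_iff]
      constructor
      · rintro (h | ⟨h1, h2⟩)
        · exact Or.inl h
        · exact Or.inr ⟨by omega, h2⟩
      · rintro (h | ⟨h1, h2⟩)
        · exact Or.inl h
        · rcases lt_or_ge a.1 b.1 with hlt | hge
          · exact Or.inl hlt
          · exact Or.inr ⟨by omega, h2⟩
    rw [Bool.decide_congr hiff]
    rcases lt_trichotomy a.1 b.1 with h | h | h
    · simp [h]
    · simp [h, lt_irrefl]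
    · simp [h, lt_asymm h, not_lt.2 (le_of_lt h)]
  rw [hbe]

lemma pvMinv_eq (l1 l2 : List Int) (hp : l1.Perm l2) (hne : l1 ≠ []) :
    (match PySem.List.min? l1 (fun v => v) with | some m => m | none => 0) =
    (match PySem.List.min? l2 (fun v => v) with | some m => m | none => 0) := by
  have hne2 : l2 ≠ [] := fun h => hne (List.Perm.eq_nil (h ▸ hp))
  obtain ⟨m1, hm1⟩ : ∃ m1, PySem.List.min? l1 (fun v => v) = some m1 := by
    cases h : PySem.List.min? l1 (fun v => v) with
    | none => exact absurd ((PySem.List.min?_eq_none_iff _ _).1 h) hne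
    | some m => exact ⟨m, rfl⟩
  obtain ⟨m2, hm2⟩ : ∃ m2, PySem.List.min? l2 (fun v => v) = some m2 := by
    cases h : PySem.List.min? l2 (fun v => v) with
    | none => exact absurd ((PySem.List.min?_eq_none_iff _ _).1 h) hne2
    | some m => exact ⟨m, rfl⟩
  rw [hm1, hm2]
  have h1m := PySem.List.min?_mem hm1
  have h2m := PySem.List.min?_mem hm2
  have h1le := PySem.List.min?_isMin hm1
  have h2le := PySem.List.min?_isMin hm2
  exact le_antisymm (h1le m2 (hp.symm.subset h2m)) (h2le m1 (hp.subset h1m))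

lemma pvPiece_eq (P C : List (Int × Int)) (hP : P.Nodup) (hC : C.Nodup)
    (hmem : ∀ c, c ∈ P ↔ c ∈ C) (hne : P ≠ []) :
    pvNormalize P =
    (PySem.List.sorted2 C (fun c => c.1) (fun c => c.2)).map
      (fun c => (c.1 -
        (match PySem.List.min? (C.map (fun c => c.1)) (fun v => v) with
          | some m => m | none => 0),
        c.2 -
        (match PySem.List.min? (C.map (fun c => c.2)) (fun v => v) with
          | some m => m | none => 0))) := by
  have hPC : P.Perm C := (List.perm_ext_iff_of_nodup hP hC).2 hmem
  rw [pvNormalize]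
  rw [pvMinv_eq (P.map (fun c => c.1)) (C.map (fun c => c.1)) (hPC.map _)
    (by simpa using hne)]
  rw [pvMinv_eq (P.map (fun c => c.2)) (C.map (fun c => c.2)) (hPC.map _)
    (by simpa using hne)]
  set mx := (match PySem.List.min? (C.map (fun c => c.1)) (fun v => v) with
    | some m => m | none => 0) with hmx
  set my := (match PySem.List.min? (C.map (fun c => c.2)) (fun v => v) with
    | some m => m | none => 0) with hmy
  rw [pvSorted2_eq, pvSorted2_eq]
  set f : Int × Int → Int × Int := fun c => (c.1 - mx, c.2 - my) with hf
  set S := PySem.List.sorted C (fun c => toLex c) with hS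
  have hSperm : S.Perm C := PySem.List.sorted_perm _ _ _
  have hSpair : S.Pairwise (fun a b => toLex a ≤ toLex b) :=
    PySem.List.sorted_pairwise _ _
  have hSnodup : S.Nodup := hSperm.nodup_iff.2 hC
  have hSlt : S.Pairwise (fun a b => toLex a < toLex b) := by
    have := List.Pairwise.and hSpair hSnodup
    exact this.imp (fun {a b} h => lt_of_le_of_ne h.1 (fun he => h.2 (by
      simpa using congrArg ofLex he)))
  apply PySem.List.sorted_eq_of_perm_of_pairwise_lt
  · exact (hSperm.map f).trans ((hPC.map f).symm)
  · refine hSlt.map f (fun a b h => ?_)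
    rw [pvLex_lt_iff] at h ⊢
    simp only [hf]
    rcases h with h | ⟨h1, h2⟩
    · left; omega
    · right; omega

lemma pvCell_step (board : List (List Int)) (target : Int) {i j : Int}
    (hin : pvInR (board.length : Int) (i, j))
    (stA : List (List Bool) × List (List (Int × Int)))
    (stB : PySem.Set (Int × Int) × List (List (Int × Int)))
    (hI : pvScanInv board target stA stB) :
    pvScanInv board target (pvCellA board target (board.length : Int) stA i j)
      (pvCellB board target stB i j) := by
  obtain ⟨I0, I1, I2, I3, I4, I5⟩ := hI
  by_cases hcond : pvBGet board i j = some target ∧ pvVGet stA.1 i j = false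
  · have hnm : (i, j) ∉ stB.1 := by
      intro hm
      have := (I3 (i, j) hin).2 hm
      rw [hcond.2] at this
      exact Bool.false_ne_true this
    have hcondB : pvBGet board i j = some target ∧
        PySem.Set.contains stB.1 (i, j) = false := by
      refine ⟨hcond.1, ?_⟩
      rw [← Bool.not_eq_true, PySem.Set.contains_iff]
      exact hnm
    rw [pvCellA, if_pos hcond, pvCellB, if_pos hcondB]
    have hT : pvTgt board target (i, j) := ⟨hin, hcond.1⟩
    obtain ⟨R0, R1, R2, R3, R4⟩ :=
      pvBfs_spec board target (fun c => c ∈ stB.1) (i, j)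
        (fun a ha d hd => I5 a ha d hd) hT
        [(i, j)] (pvVSet stA.1 i j) []
        (pvShape_vset I0 i j)
        (by
          intro c hc
          by_cases hce : c = (i, j)
          · subst hce
            constructor
            · intro _; exact Or.inr (by simp)
            · intro _; exact pvVGet_vset_self I0 hin
          · rw [pvVGet_vset_other I0 hin hc (by simpa using hce), I3 c hc]
            constructor
            · exact fun h => Or.inl h
            · rintro (h | h)
              · exact h
              · exact absurd (by simpa using h) hce)
        (by
          intro c hc
          have hce : c = (i, j) := by simpa using hc
          subst hce
          exact Relation.ReflTransGen.refl)
        (by simp)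
        (by
          intro c hc
          have hce : c = (i, j) := by simpa using hc
          subst hce
          exact hnm)
        (by intro c hc; simp at hc)
        (by simp)
    obtain ⟨C1, C2⟩ := pvComponent_spec board target hT
    have hmembs : ∀ c, c ∈ (pvBfs board target (board.length : Int) [(i, j)]
        (pvVSet stA.1 i j) []).1 ↔ c ∈ pvComponent board target i j := by
      intro c
      rw [R3 c, C2 c]
    have hijmem : (i, j) ∈ (pvBfs board target (board.length : Int) [(i, j)]
        (pvVSet stA.1 i j) []).1 := (R3 _).2 Relation.ReflTransGen.refl
    refine ⟨R0, ?_, PySem.Set.nodup_update _ _ I2, ?_, ?_, ?_⟩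
    · simp only []
      rw [I1]
      congr 1
      simp only [List.cons.injEq, and_true]
      exact pvPiece_eq _ _ R2 C1 hmembs (fun h => by rw [h] at hijmem; simp at hijmem)
    · intro c hc
      rw [R1 c hc, PySem.Set.mem_update, hmembs c]
    · intro c hc
      rcases (PySem.Set.mem_update _ _ _).1 hc with h | h
      · exact I4 c h
      · exact pvReach_tgt board target hT ((C2 c).1 h)
    · intro c hc d hd
      rcases (PySem.Set.mem_update _ _ _).1 hc with h | h
      · exact (PySem.Set.mem_update _ _ _).2 (Or.inl (I5 c h d hd))
      · exact (PySem.Set.mem_update _ _ _).2 (Or.inr ((C2 d).2 (((C2 c).1 h).tail hd)))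
  · have hcondB : ¬ (pvBGet board i j = some target ∧
        PySem.Set.contains stB.1 (i, j) = false) := by
      intro hB
      apply hcond
      refine ⟨hB.1, ?_⟩
      rw [← Bool.not_eq_true, I3 (i, j) hin]
      intro hm
      rw [(PySem.Set.contains_iff _ _).2 hm] at hB
      simp at hB
    rw [pvCellA, if_neg hcond, pvCellB, if_neg hcondB]
    exact ⟨I0, I1, I2, I3, I4, I5⟩

lemma pvScan (board : List (List Int)) (target : Int) :
    ∀ (cs : List (Int × Int)), (∀ c ∈ cs, pvInR (board.length : Int) c) →
    ∀ stA stB, pvScanInv board target stA stB →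
    pvScanInv board target
      (cs.foldl (fun st c => pvCellA board target (board.length : Int) st c.1 c.2) stA)
      (cs.foldl (fun st c => pvCellB board target st c.1 c.2) stB) := by
  intro cs
  induction cs with
  | nil => exact fun _ _ _ h => h
  | cons c cs ih =>
    intro hcs stA stB hI
    simp only [List.foldl_cons]
    exact ih (fun e he => hcs e (by simp [he])) _ _
      (pvCell_step board target (hcs c (by simp)) stA stB hI)

lemma pvFoldl_flatten {α : Type} (F : α → Int → Int → α) (l m : List Int) :
    ∀ st, l.foldl (fun st i => m.foldl (fun st j => F st i j) st) st =
      (l.flatMap (fun i => m.map (fun j => (i, j)))).foldl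
        (fun st c => F st c.1 c.2) st := by
  induction l with
  | nil => intro st; simp
  | cons x l ih =>
    intro st
    simp only [List.foldl_cons, List.flatMap_cons, List.foldl_append, List.foldl_map]
    rw [ih]

theorem find_pieces_eq (board : List (List Int)) (target : Int) :
    find_pieces board target = find_pieces_alt board target := by
  simp only [find_pieces, find_pieces_alt]
  rw [pvFoldl_flatten (fun st i j => pvCellA board target (board.length : Int) st i j)]
  rw [pvFoldl_flatten (fun st i j => pvCellB board target st i j)]
  have h := pvScan board target (pvGrid (board.length : Int))
    (fun c hc => (mem_pvGrid _ c).1 hc)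
    (List.replicate ((board.length : Int)).toNat
      (List.replicate ((board.length : Int)).toNat false), [])
    ([], [])
    ⟨pvShape_init _, rfl, List.nodup_nil,
      (fun c hc => by rw [pvVGet_init _ hc]; simp),
      (fun c hc => by simp at hc),
      (fun c hc => by simp at hc)⟩
  exact h.2.1

-- ===== VERDICT (by name: the statement is the Claim_ definition above) =====
theorem find_pieces_spec : Claim_equal_find_pieces := by
  intro board target _ _
  unfold Spec_find_pieces
  exact find_pieces_eq board target
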